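-- pv_equiv track=rewrite | github.com/098tarik/leetcode-portfolio | Graphs/valid_undirected_graph.py | is_valid_undirected_graph
-- ===== SOURCE A (Python) =====
-- def is_valid_undirected_graph(graph):
--     """
--     Validate whether the given adjacency list represents a valid undirected graph.
--
--     Args:
--         graph: List of lists where graph[i] contains the neighbors of node i
--
--     Returns:
--         bool: True if the graph is valid, False otherwise
--     """
--     # TODO: Implement the validation logic here
--
--     size = len(graph)
--
--     if not graph:
--         return True
--
--     for node in range(size):
--         seen = set()
--         for nei in graph[node]:
--             if nei < 0 or nei > size:
--                 return False
--             if nei == node: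
--                 return False
--             if nei in seen:
--                 return False
--             seen.add(nei)
--
--     edges = set()
--     for node1 in range(size):
--         for node2 in graph[node1]:
--             edge = (min(node1, node2), max(node1, node2))
--             if edge in edges:
--                 edges.remove(edge)
--             else:
--                 edges.add(edge)
--
--     return len(edges) == 0
-- ===== SOURCE B (Python) =====
-- def is_valid_undirected_graph(graph):
--     size = len(graph)
--     if not graph:
--         return True
--     # one structural pass: every neighbor in bounds, no self-loop, no duplicates per row
--     if not all(
--         all(0 <= nei <= size and nei != node for nei in row)
--         and len(set(row)) == len(row)
--         for node, row in enumerate(graph)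
--     ):
--         return False
--     # undirectedness = symmetry of the directed-edge relation
--     directed = {(i, j) for i, row in enumerate(graph) for j in row}
--     return all((j, i) in directed for (i, j) in directed)
-- ===== Notes on version B (the rewrite author's own statement) =====
-- stated objective: simpler
-- what changed: A validates rows with an early-return scan and then decides undirectedness by toggling normalized (min,max) edges in a parity set and testing emptiness; B does a structured per-row validity pass (bounds/self-loop/duplicates via len(set(row))==len(row)) and then checks that the directed-edge set {(i,j) | j in graph[i]} is symmetric, with no normalization or parity bookkeeping.
import Mathlib
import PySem

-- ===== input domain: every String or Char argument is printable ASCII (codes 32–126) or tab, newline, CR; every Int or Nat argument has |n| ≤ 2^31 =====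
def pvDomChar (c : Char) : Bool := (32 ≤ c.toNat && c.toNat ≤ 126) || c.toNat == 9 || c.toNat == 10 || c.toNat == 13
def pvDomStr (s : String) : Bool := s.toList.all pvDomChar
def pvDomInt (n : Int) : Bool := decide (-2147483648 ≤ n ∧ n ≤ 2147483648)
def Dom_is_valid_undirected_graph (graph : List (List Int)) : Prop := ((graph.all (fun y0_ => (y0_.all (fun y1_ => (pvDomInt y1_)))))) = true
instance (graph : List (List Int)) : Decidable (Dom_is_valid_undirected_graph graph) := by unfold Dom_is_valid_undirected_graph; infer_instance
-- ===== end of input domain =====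

-- B replaces A's hand-toggled parity set of normalized edges by a direct symmetry check of the
-- directed-edge set (plus a structured per-row validity pass); objective: simpler.

-- ===== PORT A =====
-- inner 'for nei in graph[node]' loop with its early returns and the running 'seen' set
def pvRowCheckA (size node : Int) (seen : PySem.Set Int) : List Int → Bool
  | [] => true
  | nei :: rest =>
    if nei < 0 || nei > size then false
    else if nei == node then false
    else if PySem.Set.contains seen nei then false
    else pvRowCheckA size node (PySem.Set.add seen nei) rest

-- outer 'for node in range(size)' loop of A's first phase (early return False)
def pvPhase1A (graph : List (List Int)) (size : Int) : List Int → Bool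
  | [] => true
  | node :: rest =>
    if pvRowCheckA size node PySem.Set.empty (PySem.List.pyGetD graph node []) then
      pvPhase1A graph size rest
    else false

-- 'if edge in edges: edges.remove(edge) else: edges.add(edge)'
-- (remove?.getD is exact here: the contains-guard guarantees membership, so remove? is some)
def pvToggle (edges : PySem.Set (Int × Int)) (e : Int × Int) : PySem.Set (Int × Int) :=
  if PySem.Set.contains edges e then (PySem.Set.remove? edges e).getD edges
  else PySem.Set.add edges e

-- A's second phase: the nested edge-toggling loops
def pvPhase2A (graph : List (List Int)) (size : Int) : PySem.Set (Int × Int) :=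
  (PySem.List.pyRange 0 size).foldl
    (fun edges node1 =>
      (PySem.List.pyGetD graph node1 []).foldl
        (fun edges node2 => pvToggle edges (min node1 node2, max node1 node2)) edges)
    PySem.Set.empty

def is_valid_undirected_graph (graph : List (List Int)) : Bool :=
  if graph = [] then true
  else if pvPhase1A graph (graph.length : Int) (PySem.List.pyRange 0 (graph.length : Int)) then
    PySem.Set.len (pvPhase2A graph (graph.length : Int)) == 0
  else false

-- ===== PORT B =====
-- per-row structural check: bounds, no self-loop, no duplicates (len(set(row)) == len(row))
def pvRowOkB (size node : Int) (row : List Int) : Bool :=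
  row.all (fun nei => decide (0 ≤ nei) && decide (nei ≤ size) && !(nei == node))
    && (PySem.Set.len (PySem.Set.ofList row) == (row.length : Int))

-- the directed-edge list {(i, j) | j in graph[i]}
def pvPairs (graph : List (List Int)) : List (Int × Int) :=
  (PySem.List.enumerate graph 0).flatMap (fun p => p.2.map (fun j => (p.1, j)))

def is_valid_undirected_graph_alt (graph : List (List Int)) : Bool :=
  if graph = [] then true
  else if (PySem.List.enumerate graph 0).all (fun p => pvRowOkB (graph.length : Int) p.1 p.2) then
    (PySem.Set.ofList (pvPairs graph)).all
      (fun e => PySem.Set.contains (PySem.Set.ofList (pvPairs graph)) (e.2, e.1))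
  else false

-- ===== PRECONDITION & SPEC =====
def Spec_is_valid_undirected_graph (graph : List (List Int)) (out : Bool) : Prop := out = is_valid_undirected_graph_alt graph
instance (graph : List (List Int)) (out : Bool) : Decidable (Spec_is_valid_undirected_graph graph out) := by unfold Spec_is_valid_undirected_graph; infer_instance

-- ===== CLAIM (what is proved, stated in full; the proofs are below) =====
def Claim_equal_is_valid_undirected_graph : Prop := ∀ (graph : List (List Int)), Dom_is_valid_undirected_graph graph → Spec_is_valid_undirected_graph graph (is_valid_undirected_graph graph)

-- ===== LEMMAS AND PROOFS =====

-- normalization used by A's toggle phase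
def pvNorm (e : Int × Int) : Int × Int := (min e.1 e.2, max e.1 e.2)

-- directed pairs of a suffix, with the enumeration start made explicit
def pvPairsFrom (graph : List (List Int)) (k : Int) : List (Int × Int) :=
  (PySem.List.enumerate graph k).flatMap (fun p => p.2.map (fun j => (p.1, j)))

-- ---- phase-1 equivalence ----

lemma pv_len_foldl_add_le {α : Type} [BEq α] (l : List α) (s : PySem.Set α) :
    (l.foldl PySem.Set.add s).length ≤ s.length + l.length := by
  induction l generalizing s with
  | nil => simp
  | cons x t ih =>
    calc (t.foldl PySem.Set.add (PySem.Set.add s x)).length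
        ≤ (PySem.Set.add s x).length + t.length := ih _
      _ ≤ (s.length + 1) + t.length := by
          unfold PySem.Set.add; split <;> simp <;> omega
      _ = s.length + (t.length + 1) := by omega

lemma pv_nodup_of_foldl_add_len {α : Type} [BEq α] [LawfulBEq α] :
    ∀ (l : List α) (s : PySem.Set α),
      (l.foldl PySem.Set.add s).length = s.length + l.length →
      l.Nodup ∧ ∀ x ∈ l, x ∉ s := by
  intro l
  induction l with
  | nil => intro s _; simp
  | cons x t ih =>
    intro s h
    simp only [List.foldl_cons] at h
    by_cases hx : x ∈ s
    · rw [PySem.Set.add_of_mem hx] at h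
      have hle := pv_len_foldl_add_le t s
      simp only [List.length_cons] at h
      omega
    · rw [PySem.Set.add_of_not_mem hx] at h
      have h' : (t.foldl PySem.Set.add (s ++ [x])).length = (s ++ [x]).length + t.length := by
        simp only [List.length_append, List.length_cons, List.length_nil] at h ⊢
        omega
      obtain ⟨hnd, hni⟩ := ih (s ++ [x]) h'
      refine ⟨List.nodup_cons.mpr ⟨?_, hnd⟩, ?_⟩
      · intro hxt
        have := hni x hxt
        simp at this
      · intro y hy
        rcases List.mem_cons.mp hy with rfl | hyt
        · exact hx
        · intro hys
          exact hni y hyt (by simp [hys])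

lemma pv_nodup_of_ofList_len {α : Type} [BEq α] [LawfulBEq α] (l : List α)
    (h : (PySem.Set.ofList l).length = l.length) : l.Nodup := by
  exact (pv_nodup_of_foldl_add_len l PySem.Set.empty
    (by simpa [PySem.Set.ofList, PySem.Set.empty] using h)).1

lemma pv_rowB_iff (size node : Int) (row : List Int) :
    pvRowOkB size node row = true ↔
      ((∀ nei ∈ row, 0 ≤ nei ∧ nei ≤ size ∧ nei ≠ node) ∧ row.Nodup) := by
  constructor
  · intro h
    simp only [pvRowOkB, Bool.and_eq_true, List.all_eq_true] at h
    obtain ⟨h1, h2⟩ := h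
    refine ⟨fun nei hn => ?_, ?_⟩
    · have := h1 nei hn
      simp only [Bool.and_eq_true, decide_eq_true_eq, Bool.not_eq_true', beq_eq_false_iff_ne] at this
      tauto
    · apply pv_nodup_of_ofList_len
      simp only [PySem.Set.len, beq_iff_eq, Nat.cast_inj] at h2
      exact h2
  · rintro ⟨h1, h2⟩
    simp only [pvRowOkB, Bool.and_eq_true, List.all_eq_true]
    refine ⟨fun nei hn => ?_, ?_⟩
    · obtain ⟨ha, hb, hc⟩ := h1 nei hn
      simp only [Bool.and_eq_true, decide_eq_true_eq, Bool.not_eq_true', beq_eq_false_iff_ne]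
      exact ⟨⟨ha, hb⟩, hc⟩
    · rw [PySem.Set.ofList_eq_self_of_nodup row h2]
      simp [PySem.Set.len]

lemma pv_rowA_iff (size node : Int) (row : List Int) :
    ∀ (seen : PySem.Set Int),
      pvRowCheckA size node seen row = true ↔
        ((∀ nei ∈ row, (0 ≤ nei ∧ nei ≤ size ∧ nei ≠ node) ∧ nei ∉ seen) ∧ row.Nodup) := by
  induction row with
  | nil => intro seen; simp [pvRowCheckA]
  | cons nei t ih =>
    intro seen
    rw [pvRowCheckA]
    split_ifs with hb hn hc
    · simp only [Bool.false_eq_true, false_iff, not_and]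
      intro h _
      obtain ⟨⟨h0, h1, _⟩, _⟩ := h nei (List.mem_cons_self ..)
      simp only [Bool.or_eq_true, decide_eq_true_eq] at hb
      omega
    · simp only [beq_iff_eq] at hn
      simp only [Bool.false_eq_true, false_iff, not_and]
      intro h _
      exact (h nei (List.mem_cons_self ..)).1.2.2 hn
    · rw [PySem.Set.contains_iff] at hc
      simp only [Bool.false_eq_true, false_iff, not_and]
      intro h _
      exact (h nei (List.mem_cons_self ..)).2 hc
    · simp only [Bool.or_eq_true, decide_eq_true_eq, not_or, not_lt] at hb
      simp only [beq_iff_eq] at hn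
      rw [PySem.Set.contains_iff] at hc
      rw [ih]
      constructor
      · rintro ⟨hall, hnd⟩
        refine ⟨?_, ?_⟩
        · intro m hm
          rcases List.mem_cons.mp hm with rfl | hmt
          · exact ⟨⟨hb.1, by omega, hn⟩, hc⟩
          · obtain ⟨hP, hns⟩ := hall m hmt
            rw [PySem.Set.mem_add] at hns
            exact ⟨hP, fun hmseen => hns (Or.inl hmseen)⟩
        · refine List.nodup_cons.mpr ⟨?_, hnd⟩
          intro hnt
          have := (hall nei hnt).2
          rw [PySem.Set.mem_add] at this
          exact this (Or.inr rfl)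
      · rintro ⟨hall, hnd⟩
        refine ⟨?_, (List.nodup_cons.mp hnd).2⟩
        intro m hmt
        obtain ⟨hP, hns⟩ := hall m (List.mem_cons_of_mem _ hmt)
        refine ⟨hP, ?_⟩
        rw [PySem.Set.mem_add]
        rintro (hms | rfl)
        · exact hns hms
        · exact (List.nodup_cons.mp hnd).1 hmt

lemma pv_rowAB (size node : Int) (row : List Int) :
    pvRowCheckA size node PySem.Set.empty row = pvRowOkB size node row := by
  rw [Bool.eq_iff_iff, pv_rowA_iff, pv_rowB_iff]
  constructor
  · rintro ⟨h, hnd⟩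
    exact ⟨fun m hm => (h m hm).1, hnd⟩
  · rintro ⟨h, hnd⟩
    exact ⟨fun m hm => ⟨h m hm, by simp [PySem.Set.empty]⟩, hnd⟩

lemma pv_phase1_eq (g : List (List Int)) :
    ∀ (k : Nat),
      pvPhase1A g (g.length : Int) (PySem.List.pyRange (k : Int) (g.length : Int)) =
        (PySem.List.enumerate (g.drop k) (k : Int)).all
          (fun p => pvRowOkB (g.length : Int) p.1 p.2) := by
  intro k
  generalize hm : g.length - k = m
  induction m generalizing k with
  | zero =>
    have hk : g.length ≤ k := by omega
    rw [PySem.List.pyRange_one_eq_nil (by exact_mod_cast hk)]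
    rw [List.drop_eq_nil_of_le hk]
    simp [pvPhase1A, PySem.List.enumerate]
  | succ m ih =>
    have hk : k < g.length := by omega
    rw [PySem.List.pyRange_one_cons (by exact_mod_cast hk)]
    rw [pvPhase1A]
    rw [List.drop_eq_getElem_cons hk, PySem.List.enumerate_cons, List.all_cons]
    have hget : PySem.List.pyGetD g ((k : Nat) : Int) [] = g[k] := by
      rw [PySem.List.pyGetD_natCast]
      exact List.getD_eq_getElem g [] hk
    rw [hget, pv_rowAB]
    have hrec := ih (k + 1) (by omega)
    have hcast : ((k : Int) + 1) = (((k + 1 : Nat)) : Int) := by push_cast; ring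
    rw [hcast, hrec]
    cases hB : pvRowOkB (g.length : Int) (k : Int) g[k] <;> simp [hB]

-- ---- phase-2: flattening the nested toggle loops ----

lemma pv_phase2_flat (g : List (List Int)) :
    ∀ (k : Nat) (ed : PySem.Set (Int × Int)),
      (PySem.List.pyRange (k : Int) (g.length : Int)).foldl
        (fun edges node1 =>
          (PySem.List.pyGetD g node1 []).foldl
            (fun edges node2 => pvToggle edges (min node1 node2, max node1 node2)) edges) ed =
      (((PySem.List.enumerate (g.drop k) (k : Int)).flatMap
          (fun p => p.2.map (fun j => (p.1, j)))).map pvNorm).foldl pvToggle ed := by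
  intro k
  generalize hm : g.length - k = m
  induction m generalizing k with
  | zero =>
    intro ed
    have hk : g.length ≤ k := by omega
    rw [PySem.List.pyRange_one_eq_nil (by exact_mod_cast hk)]
    rw [List.drop_eq_nil_of_le hk]
    simp [PySem.List.enumerate]
  | succ m ih =>
    intro ed
    have hk : k < g.length := by omega
    rw [PySem.List.pyRange_one_cons (by exact_mod_cast hk)]
    rw [List.foldl_cons]
    rw [List.drop_eq_getElem_cons hk, PySem.List.enumerate_cons, List.flatMap_cons,
        List.map_append, List.foldl_append]
    have hget : PySem.List.pyGetD g ((k : Nat) : Int) [] = g[k] := by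
      rw [PySem.List.pyGetD_natCast]
      exact List.getD_eq_getElem g [] hk
    have hinner :
        (PySem.List.pyGetD g ((k : Nat) : Int) []).foldl
          (fun edges node2 => pvToggle edges (min (k : Int) node2, max (k : Int) node2)) ed =
        ((g[k].map (fun j => ((k : Int), j))).map pvNorm).foldl pvToggle ed := by
      rw [hget, List.foldl_map, List.foldl_map]
      rfl
    rw [hinner]
    have hcast : ((k : Int) + 1) = (((k + 1 : Nat)) : Int) := by push_cast; ring
    rw [hcast]
    exact ih (k + 1) (by omega) _

-- ---- the toggle fold computes parity of counts ----

lemma pv_mem_toggle (s : PySem.Set (Int × Int)) (x y : Int × Int) :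
    y ∈ pvToggle s x ↔ ((y ∈ s ∧ y ≠ x) ∨ (y = x ∧ x ∉ s)) := by
  unfold pvToggle
  by_cases hx : PySem.Set.contains s x = true
  · have hxs : x ∈ s := (PySem.Set.contains_iff s x).mp hx
    rw [if_pos hx, PySem.Set.remove?_of_mem hxs, Option.getD_some, PySem.Set.mem_discard]
    constructor
    · rintro ⟨h1, h2⟩
      exact Or.inl ⟨h1, h2⟩
    · rintro (⟨h1, h2⟩ | ⟨rfl, h⟩)
      · exact ⟨h1, h2⟩
      · exact absurd hxs h
  · have hxs : x ∉ s := fun h => hx ((PySem.Set.contains_iff s x).mpr h)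
    rw [if_neg hx, PySem.Set.mem_add]
    constructor
    · rintro (h | rfl)
      · exact Or.inl ⟨h, fun he => hxs (he ▸ h)⟩
      · exact Or.inr ⟨rfl, hxs⟩
    · rintro (⟨h, _⟩ | ⟨rfl, _⟩)
      · exact Or.inl h
      · exact Or.inr rfl

lemma pv_nodup_toggle {s : PySem.Set (Int × Int)} (hs : s.Nodup) (x : Int × Int) :
    (pvToggle s x).Nodup := by
  unfold pvToggle
  by_cases hx : PySem.Set.contains s x = true
  · rw [if_pos hx, PySem.Set.remove?_of_mem ((PySem.Set.contains_iff s x).mp hx), Option.getD_some]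
    exact PySem.Set.nodup_discard s x hs
  · rw [if_neg hx]
    exact PySem.Set.nodup_add s x hs

lemma pv_mem_toggleFold :
    ∀ (M : List (Int × Int)) (s : PySem.Set (Int × Int)), s.Nodup →
      (M.foldl pvToggle s).Nodup ∧
      ∀ e, (e ∈ M.foldl pvToggle s ↔ ((e ∈ s) ↔ M.count e % 2 = 0)) := by
  intro M
  induction M with
  | nil => intro s hs; exact ⟨hs, fun e => by simp⟩
  | cons x M ih =>
    intro s hs
    simp only [List.foldl_cons]
    obtain ⟨hnd, hmem⟩ := ih (pvToggle s x) (pv_nodup_toggle hs x)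
    refine ⟨hnd, fun e => ?_⟩
    rw [hmem e, pv_mem_toggle s x e, List.count_cons]
    by_cases hex : e = x
    · subst hex
      simp only [ne_eq, not_true_eq_false, and_false, false_or, true_and, beq_self_eq_true,
        if_pos, if_true]
      by_cases hes : e ∈ s <;> simp only [hes, true_iff, false_iff, iff_true, iff_false,
        not_not, not_true_eq_false, not_false_eq_true, true_and, false_and, and_true] <;>
        (try constructor) <;> intro h <;> omega
    · have hxe : (x == e) = false := beq_eq_false_iff_ne.mpr (fun h => hex h.symm)
      simp [hxe, hex]

-- ---- counting normalized pairs ----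

lemma pv_norm_eq_iff {y e : Int × Int} (hy : y.1 ≠ y.2) (he : e.1 ≠ e.2) :
    pvNorm y = pvNorm e ↔ (y = e ∨ y = (e.2, e.1)) := by
  obtain ⟨y1, y2⟩ := y
  obtain ⟨e1, e2⟩ := e
  simp only [pvNorm, Prod.mk.injEq] at *
  omega

lemma pv_countP_pair (u v : Int × Int) (huv : u ≠ v) :
    ∀ (L : List (Int × Int)),
      L.countP (fun y => y == u || y == v) = L.count u + L.count v := by
  intro L
  induction L with
  | nil => simp
  | cons a L ih =>
    simp only [List.countP_cons, List.count_cons, ih]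
    by_cases hu : a = u <;> by_cases hv : a = v
    · exact absurd (hu ▸ hv : u = v) huv
    · subst hu
      simp only [beq_self_eq_true, Bool.true_or, if_true,
        beq_eq_false_iff_ne.mpr hv, if_false, Bool.false_eq_true]
      omega
    · subst hv
      simp only [beq_self_eq_true, Bool.or_true, if_true,
        beq_eq_false_iff_ne.mpr hu, if_false, Bool.false_eq_true]
      omega
    · simp only [beq_eq_false_iff_ne.mpr hu, beq_eq_false_iff_ne.mpr hv,
        Bool.or_self, if_false, Bool.false_eq_true]
      omega

lemma pv_count_norm (L : List (Int × Int)) (hNS : ∀ e ∈ L, e.1 ≠ e.2)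
    (e : Int × Int) (he : e.1 ≠ e.2) :
    (L.map pvNorm).count (pvNorm e) = L.count e + L.count (e.2, e.1) := by
  have hne : e ≠ (e.2, e.1) := by
    intro h
    exact he (by rw [Prod.ext_iff] at h; exact h.1)
  rw [List.count_eq_countP, List.countP_map]
  rw [List.countP_congr (q := fun y => y == e || y == (e.2, e.1))
    (fun y hy => by
      simp only [Function.comp_apply, beq_iff_eq, Bool.or_eq_true, decide_eq_true_eq]
      exact pv_norm_eq_iff (hNS y hy) he)]
  exact pv_countP_pair e (e.2, e.1) hne L

lemma pv_parity_iff_symm (L : List (Int × Int)) (hND : L.Nodup)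
    (hNS : ∀ e ∈ L, e.1 ≠ e.2) :
    (∀ e, (L.map pvNorm).count e % 2 = 0) ↔ (∀ e ∈ L, (e.2, e.1) ∈ L) := by
  have hle1 : ∀ e : Int × Int, L.count e ≤ 1 := fun e => List.nodup_iff_count_le_one.mp hND e
  constructor
  · intro h e he
    have he2 : e.1 ≠ e.2 := hNS e he
    have hcnt := pv_count_norm L hNS e he2
    have h1 : 1 ≤ L.count e := List.count_pos_iff.mpr he
    have hpar := h (pvNorm e)
    rw [hcnt] at hpar
    have := hle1 e
    have := hle1 (e.2, e.1)
    exact List.count_pos_iff.mp (by omega)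
  · intro h e
    by_cases hm : e ∈ L.map pvNorm
    · obtain ⟨y, hy, rfl⟩ := List.mem_map.mp hm
      rw [pv_count_norm L hNS y (hNS y hy)]
      have h1 : 1 ≤ L.count y := List.count_pos_iff.mpr hy
      have h2 : 1 ≤ L.count (y.2, y.1) := List.count_pos_iff.mpr (h y hy)
      have := hle1 y
      have := hle1 (y.2, y.1)
      omega
    · rw [List.count_eq_zero.mpr hm]

-- ---- structure of the pair list ----

lemma pv_fst_mem_pairsFrom :
    ∀ (g : List (List Int)) (k : Int) (e : Int × Int), e ∈ pvPairsFrom g k → k ≤ e.1 := by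
  intro g
  induction g with
  | nil => intro k e h; simp [pvPairsFrom, PySem.List.enumerate] at h
  | cons r g ih =>
    intro k e h
    unfold pvPairsFrom at h
    rw [PySem.List.enumerate_cons, List.flatMap_cons] at h
    rcases List.mem_append.mp h with h | h
    · obtain ⟨j, hj, rfl⟩ := List.mem_map.mp h
      simp
    · have := ih (k + 1) e h
      omega

lemma pv_nodup_pairsFrom :
    ∀ (g : List (List Int)) (k : Int),
      (∀ p ∈ PySem.List.enumerate g k, p.2.Nodup) → (pvPairsFrom g k).Nodup := by
  intro g
  induction g with
  | nil => intro k _; simp [pvPairsFrom, PySem.List.enumerate]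
  | cons r g ih =>
    intro k hrows
    unfold pvPairsFrom
    rw [PySem.List.enumerate_cons, List.flatMap_cons]
    refine List.Nodup.append ?_ ?_ ?_
    · refine List.Nodup.map ?_ (hrows (k, r) (by rw [PySem.List.enumerate_cons]; exact List.mem_cons_self ..))
      intro a b hab
      exact congrArg Prod.snd hab
    · exact ih (k + 1) (fun p hp => hrows p (by rw [PySem.List.enumerate_cons]; exact List.mem_cons_of_mem _ hp))
    · intro a ha hb
      obtain ⟨j, hj, rfl⟩ := List.mem_map.mp ha
      have := pv_fst_mem_pairsFrom g (k + 1) _ hb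
      simp at this

lemma pv_mem_pairs (g : List (List Int)) (e : Int × Int) :
    e ∈ pvPairs g ↔ ∃ p ∈ PySem.List.enumerate g 0, e.1 = p.1 ∧ e.2 ∈ p.2 := by
  unfold pvPairs
  rw [List.mem_flatMap]
  constructor
  · rintro ⟨p, hp, hmem⟩
    obtain ⟨j, hj, rfl⟩ := List.mem_map.mp hmem
    exact ⟨p, hp, rfl, hj⟩
  · rintro ⟨p, hp, h1, h2⟩
    refine ⟨p, hp, List.mem_map.mpr ⟨e.2, h2, ?_⟩⟩
    obtain ⟨a, b⟩ := e
    simp [← h1]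

-- ===== VERDICT (by name: the statement is the Claim_ definition above) =====
theorem is_valid_undirected_graph_spec : Claim_equal_is_valid_undirected_graph := by
  intro graph _
  unfold Spec_is_valid_undirected_graph is_valid_undirected_graph is_valid_undirected_graph_alt
  by_cases hg : graph = []
  · simp [hg]
  · rw [if_neg hg, if_neg hg]
    have hp1 : pvPhase1A graph (graph.length : Int) (PySem.List.pyRange 0 (graph.length : Int)) =
        (PySem.List.enumerate graph 0).all (fun p => pvRowOkB (graph.length : Int) p.1 p.2) := by
      have := pv_phase1_eq graph 0
      simpa using this
    rw [hp1]
    by_cases hall : (PySem.List.enumerate graph 0).all (fun p => pvRowOkB (graph.length : Int) p.1 p.2) = true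
    · rw [if_pos hall, if_pos hall]
      -- phase-1 facts
      have hGood : ∀ p ∈ PySem.List.enumerate graph 0,
          (∀ nei ∈ p.2, 0 ≤ nei ∧ nei ≤ (graph.length : Int) ∧ nei ≠ p.1) ∧ p.2.Nodup := by
        intro p hp
        have := (List.all_eq_true.mp hall) p hp
        exact (pv_rowB_iff (graph.length : Int) p.1 p.2).mp this
      have hNS : ∀ e ∈ pvPairs graph, e.1 ≠ e.2 := by
        intro e he
        obtain ⟨p, hp, h1, h2⟩ := (pv_mem_pairs graph e).mp he
        have := ((hGood p hp).1 e.2 h2).2.2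
        rw [h1]
        exact fun hcontra => this hcontra.symm
      have hND : (pvPairs graph).Nodup :=
        pv_nodup_pairsFrom graph 0 (fun p hp => (hGood p hp).2)
      -- flatten A's phase 2
      have hflat : pvPhase2A graph (graph.length : Int) =
          ((pvPairs graph).map pvNorm).foldl pvToggle PySem.Set.empty := by
        unfold pvPhase2A pvPairs
        have := pv_phase2_flat graph 0 PySem.Set.empty
        simpa using this
      obtain ⟨hEnd, hEmem⟩ :=
        pv_mem_toggleFold ((pvPairs graph).map pvNorm) PySem.Set.empty (by simp [PySem.Set.empty])
      rw [Bool.eq_iff_iff]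
      have hA : (PySem.Set.len (pvPhase2A graph (graph.length : Int)) == 0) = true ↔
          ∀ e, ((pvPairs graph).map pvNorm).count e % 2 = 0 := by
        rw [hflat]
        simp only [PySem.Set.len, beq_iff_eq, Nat.cast_eq_zero, List.length_eq_zero_iff]
        rw [List.eq_nil_iff_forall_not_mem]
        constructor
        · intro h e
          have := h e
          rw [hEmem e] at this
          by_cases hc : ((pvPairs graph).map pvNorm).count e % 2 = 0
          · exact hc
          · exfalso
            apply this
            simp only [PySem.Set.empty]
            constructor
            · intro h'; simp at h'
            · intro h'; exact absurd h' hc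
        · intro h e
          rw [hEmem e]
          intro hiff
          have := hiff.mpr (h e)
          simp [PySem.Set.empty] at this
      have hB : ((PySem.Set.ofList (pvPairs graph)).all
          (fun e => PySem.Set.contains (PySem.Set.ofList (pvPairs graph)) (e.2, e.1))) = true ↔
          ∀ e ∈ pvPairs graph, (e.2, e.1) ∈ pvPairs graph := by
        simp only [List.all_eq_true]
        constructor
        · intro h e he
          have := h e ((PySem.Set.mem_ofList (pvPairs graph) e).mpr he)
          rw [PySem.Set.contains_iff, PySem.Set.mem_ofList] at this
          exact this
        · intro h e he
          rw [PySem.Set.contains_iff, PySem.Set.mem_ofList]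
          exact h e ((PySem.Set.mem_ofList (pvPairs graph) e).mp he)
      rw [hA, hB]
      exact pv_parity_iff_symm (pvPairs graph) hND hNS
    · rw [if_neg hall, if_neg hall]
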